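-- pv_equiv track=rewrite | github.com/projeto-de-algoritmos-2025/LeetCode-DC | 218.py | mergeSkylines
-- ===== SOURCE A (Python) =====
-- from typing import List
--
-- def mergeSkylines(left: List[List[int]], right: List[List[int]]) -> List[List[int]]:
--     points = []
--     i = j = 0
--     currH1 = currH2 = 0
--
--     while i < len(left) or j < len(right):
--         if j >= len(right) or (i < len(left) and left[i][0] < right[j][0]):
--             x = left[i][0]
--             currH1 = left[i][1]
--             i += 1
--         elif i >= len(left) or (j < len(right) and right[j][0] < left[i][0]):
--             x = right[j][0]
--             currH2 = right[j][1]
--             j += 1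
--         else:
--             x = left[i][0]
--             currH1 = left[i][1]
--             currH2 = right[j][1]
--             i += 1
--             j += 1
--
--         maxH = max(currH1, currH2)
--         if not points or points[-1][1] != maxH:
--             points.append([x, maxH])
--
--     return points
-- ===== SOURCE B (Python) =====
-- from typing import List
--
-- def mergeSkylines(left: List[List[int]], right: List[List[int]]) -> List[List[int]]:
--     # Phase 1 (control only): the merge path over the x-coordinates, as a move string.
--     xs = [b[0] for b in left]
--     ys = [b[0] for b in right]
--     moves = []
--     i = j = 0
--     while i < len(xs) and j < len(ys):
--         if xs[i] < ys[j]: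
--             moves.append("L"); i += 1
--         elif ys[j] < xs[i]:
--             moves.append("R"); j += 1
--         else:
--             moves.append("B"); i += 1; j += 1
--     moves.extend("L" * (len(xs) - i))
--     moves.extend("R" * (len(ys) - j))
--     # Phase 2 (data): decode the path into the critical-point stream by direct
--     # indexing with prefix counters -- no carried height state.
--     stream = []
--     a = b = 0
--     for m in moves:
--         if m != "R":
--             a += 1
--         if m != "L":
--             b += 1
--         x = left[a - 1][0] if m != "R" else right[b - 1][0]
--         h1 = left[a - 1][1] if a else 0
--         h2 = right[b - 1][1] if b else 0
--         stream.append((x, h1 if h1 > h2 else h2))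
--     # Phase 3: keep the first point of every run of equal heights.
--     return [[x, h] for k, (x, h) in enumerate(stream) if k == 0 or stream[k - 1][1] != h]
-- ===== Notes on version B (the rewrite author's own statement) =====
-- stated objective: alternative
-- what changed: A interleaves everything in one loop that carries currH1/currH2 and appends conditionally; B separates control from data: a first pass computes only the merge path over the x-coordinates as a move string, a second pass decodes the path into the height stream by direct indexing with prefix counters (no carried height state), and a final comprehension keeps the first point of every height run.
import Mathlib
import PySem

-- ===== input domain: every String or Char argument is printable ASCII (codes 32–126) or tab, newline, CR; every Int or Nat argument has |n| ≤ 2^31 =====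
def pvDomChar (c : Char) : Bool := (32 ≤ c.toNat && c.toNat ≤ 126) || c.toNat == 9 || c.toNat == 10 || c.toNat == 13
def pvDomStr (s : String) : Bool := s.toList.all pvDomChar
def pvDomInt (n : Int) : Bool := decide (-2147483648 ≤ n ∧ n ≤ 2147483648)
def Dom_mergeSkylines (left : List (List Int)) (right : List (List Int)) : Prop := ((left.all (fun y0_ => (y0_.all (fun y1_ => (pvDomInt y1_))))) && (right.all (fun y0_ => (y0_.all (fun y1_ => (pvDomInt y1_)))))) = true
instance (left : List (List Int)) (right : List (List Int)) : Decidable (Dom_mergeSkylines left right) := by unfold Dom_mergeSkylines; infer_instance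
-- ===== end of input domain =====

-- B separates control from data: a first pass computes only the merge path over the
-- x-coordinates as a move string, a second pass decodes the path into the height stream by
-- direct indexing with prefix counters, a final pass keeps the first point of each height
-- run (objective: alternative decomposition, same cost).

-- ===== PORT A =====
-- A's while loop over indices i, j becomes the obvious recursion over the two suffixes
-- left[i:], right[j:]; inside Pre_ every inner list has length ≥ 2, so getD is exact there.
def mergeSkylinesLoop (ls rs : List (List Int)) (h1 h2 : Int) (points : List (List Int)) :
    List (List Int) :=
  match ls, rs with
  | [], [] => points
  | l :: ls', [] =>
      -- j >= len(right): take left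
      let x := l.getD 0 0
      let h1' := l.getD 1 0
      let maxH := max h1' h2
      let points' := if points = [] ∨ ((points.getLast?.getD []).getD 1 0) ≠ maxH then
          points ++ [[x, maxH]] else points
      mergeSkylinesLoop ls' [] h1' h2 points'
  | [], r :: rs' =>
      -- i >= len(left): take right
      let x := r.getD 0 0
      let h2' := r.getD 1 0
      let maxH := max h1 h2'
      let points' := if points = [] ∨ ((points.getLast?.getD []).getD 1 0) ≠ maxH then
          points ++ [[x, maxH]] else points
      mergeSkylinesLoop [] rs' h1 h2' points'
  | l :: ls', r :: rs' =>
      if l.getD 0 0 < r.getD 0 0 then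
        let x := l.getD 0 0
        let h1' := l.getD 1 0
        let maxH := max h1' h2
        let points' := if points = [] ∨ ((points.getLast?.getD []).getD 1 0) ≠ maxH then
            points ++ [[x, maxH]] else points
        mergeSkylinesLoop ls' (r :: rs') h1' h2 points'
      else if r.getD 0 0 < l.getD 0 0 then
        let x := r.getD 0 0
        let h2' := r.getD 1 0
        let maxH := max h1 h2'
        let points' := if points = [] ∨ ((points.getLast?.getD []).getD 1 0) ≠ maxH then
            points ++ [[x, maxH]] else points
        mergeSkylinesLoop (l :: ls') rs' h1 h2' points'
      else
        let x := l.getD 0 0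
        let h1' := l.getD 1 0
        let h2' := r.getD 1 0
        let maxH := max h1' h2'
        let points' := if points = [] ∨ ((points.getLast?.getD []).getD 1 0) ≠ maxH then
            points ++ [[x, maxH]] else points
        mergeSkylinesLoop ls' rs' h1' h2' points'
  termination_by ls.length + rs.length
  decreasing_by all_goals simp <;> omega

def mergeSkylines (left : List (List Int)) (right : List (List Int)) : List (List Int) :=
  mergeSkylinesLoop left right 0 0 []

-- ===== PORT B =====
-- Phase 1 of Source B: the merge path over the two x-coordinate lists, as a move list
-- (the two extend("L"*…)/extend("R"*…) tails become the replicates).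
def movesOf : List Int → List Int → List Char
  | [], ys => List.replicate ys.length 'R'
  | _ :: xs, [] => List.replicate (xs.length + 1) 'L'
  | x :: xs, y :: ys =>
      if x < y then 'L' :: movesOf xs (y :: ys)
      else if y < x then 'R' :: movesOf (x :: xs) ys
      else 'B' :: movesOf xs ys
  termination_by xs ys => xs.length + ys.length
  decreasing_by all_goals simp <;> omega

-- Phase 2 of Source B: decode the path with the prefix counters a, b; left[a-1][k] is
-- (L.getD (a-1) []).getD k 0, exact inside Pre_ (inner lists of length ≥ 2, indices in range).
def decodeLoop (L R : List (List Int)) : List Char → Nat → Nat → List (Int × Int)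
  | [], _, _ => []
  | m :: t, a, b =>
      let a' := if m ≠ 'R' then a + 1 else a
      let b' := if m ≠ 'L' then b + 1 else b
      let x := if m ≠ 'R' then (L.getD (a' - 1) []).getD 0 0 else (R.getD (b' - 1) []).getD 0 0
      let h1 := if a' ≠ 0 then (L.getD (a' - 1) []).getD 1 0 else 0
      let h2 := if b' ≠ 0 then (R.getD (b' - 1) []).getD 1 0 else 0
      (x, if h2 < h1 then h1 else h2) :: decodeLoop L R t a' b'

-- Phase 3 of Source B: the comprehension keeps (x,h) iff k == 0 or stream[k-1][1] != h;
-- the previous element's height is carried as `prev` (exact: none ↔ k == 0).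
def compressPass : Option Int → List (Int × Int) → List (List Int)
  | _, [] => []
  | prev, (x, h) :: t =>
      match prev with
      | none => [x, h] :: compressPass (some h) t
      | some p => if p ≠ h then [x, h] :: compressPass (some h) t else compressPass (some h) t

def mergeSkylines_alt (left : List (List Int)) (right : List (List Int)) : List (List Int) :=
  let xs := left.map (fun b => b.getD 0 0)
  let ys := right.map (fun b => b.getD 0 0)
  compressPass none (decodeLoop left right (movesOf xs ys) 0 0)

-- ===== PRECONDITION & SPEC =====
-- A reads b[0] and b[1] of every building of both lists and raises IndexError on any inner
-- list shorter than 2; Pre_ excludes exactly those inputs.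
def Pre_mergeSkylines (left : List (List Int)) (right : List (List Int)) : Prop :=
  (∀ b ∈ left, 2 ≤ b.length) ∧ (∀ b ∈ right, 2 ≤ b.length)
instance (left : List (List Int)) (right : List (List Int)) : Decidable (Pre_mergeSkylines left right) := by unfold Pre_mergeSkylines; infer_instance

def pvWitness_mergeSkylines : List (List Int) × List (List Int) :=
  ([[1, 3], [4, 0]], [[2, 5], [6, 0]])

def Spec_mergeSkylines (left : List (List Int)) (right : List (List Int)) (out : List (List Int)) : Prop := out = mergeSkylines_alt left right
instance (left : List (List Int)) (right : List (List Int)) (out : List (List Int)) : Decidable (Spec_mergeSkylines left right out) := by unfold Spec_mergeSkylines; infer_instance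

-- ===== CLAIM (what is proved, stated in full; the proofs are below) =====
def Claim_equal_mergeSkylines : Prop := ∀ (left : List (List Int)) (right : List (List Int)), Dom_mergeSkylines left right → Pre_mergeSkylines left right → Spec_mergeSkylines left right (mergeSkylines left right)

-- ===== LEMMAS AND PROOFS =====

-- last emitted height of A's accumulator, as the Option prev of B's compression pass
def prevOf (points : List (List Int)) : Option Int :=
  points.getLast?.map (fun b => b.getD 1 0)

theorem compressPass_none_cons (x h : Int) (t : List (Int × Int)) :
    compressPass none ((x, h) :: t) = [x, h] :: compressPass (some h) t := rfl

theorem compressPass_some_cons (p x h : Int) (t : List (Int × Int)) :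
    compressPass (some p) ((x, h) :: t) =
      if p ≠ h then [x, h] :: compressPass (some h) t else compressPass (some h) t := rfl

theorem prevOf_append (points : List (List Int)) (x h : Int) :
    prevOf (points ++ [[x, h]]) = some h := by
  simp [prevOf]

theorem prevOf_cond (points : List (List Int)) (maxH : Int)
    (hne : ¬ (points = [] ∨ ((points.getLast?.getD []).getD 1 0) ≠ maxH)) :
    prevOf points = some maxH := by
  push_neg at hne
  obtain ⟨h1, h2⟩ := hne
  rcases hl : points.getLast? with _ | b
  · exact absurd (List.getLast?_eq_none_iff.mp hl) h1
  · rw [hl] at h2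
    simp only [Option.getD_some] at h2
    unfold prevOf
    rw [hl]
    simp only [Option.map_some]
    exact congrArg some h2

theorem prevOf_update (points : List (List Int)) (x maxH : Int) :
    prevOf (if points = [] ∨ ((points.getLast?.getD []).getD 1 0) ≠ maxH then
        points ++ [[x, maxH]] else points) = some maxH := by
  split_ifs with hc
  · exact prevOf_append points x maxH
  · exact prevOf_cond points maxH hc

-- compression step: one stream element against A's conditional append
theorem compress_cons (points : List (List Int)) (x maxH : Int) (t : List (Int × Int)) :
    compressPass (prevOf points) ((x, maxH) :: t) =
      (if points = [] ∨ ((points.getLast?.getD []).getD 1 0) ≠ maxH then [[x, maxH]] else [])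
        ++ compressPass (some maxH) t := by
  rcases hl : points.getLast? with _ | b
  · have hnil : points = [] := List.getLast?_eq_none_iff.mp hl
    subst hnil
    simp [prevOf, compressPass_none_cons]
  · have hpne : points ≠ [] := by intro h; simp [h] at hl
    simp only [prevOf, hl, Option.map_some, Option.getD_some]
    rw [compressPass_some_cons]
    by_cases he : b.getD 1 0 = maxH
    · rw [if_neg (by simpa using he), if_neg (by simp [hpne]; simpa using he),
        List.nil_append]
    · rw [if_pos he, if_pos (Or.inr he), List.cons_append, List.nil_append]

-- A's conditional append followed by the rest = one compress_cons step
theorem step_eq (points : List (List Int)) (x maxH : Int) (t : List (Int × Int)) :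
    (if points = [] ∨ ((points.getLast?.getD []).getD 1 0) ≠ maxH then
        points ++ [[x, maxH]] else points) ++ compressPass (some maxH) t
      = points ++ compressPass (prevOf points) ((x, maxH) :: t) := by
  rw [compress_cons]
  split_ifs <;> simp

-- Python's `h1 if h1 > h2 else h2` is max
theorem pymax_eq (a b : Int) : (if b < a then a else b) = max a b := by
  split_ifs <;> omega

theorem movesOf_nil_right (xs : List Int) : movesOf xs [] = List.replicate xs.length 'L' := by
  cases xs <;> simp [movesOf]

-- the main invariant: A's walk from cursor position (a, b) = the decoded tail of the path,
-- compressed against the accumulator's last height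
theorem loop_eq_decode (L R : List (List Int)) (n : Nat) :
    ∀ (a b : Nat) (h1 h2 : Int) (points : List (List Int)),
    n = (L.length - a) + (R.length - b) → a ≤ L.length → b ≤ R.length →
    h1 = (if a = 0 then 0 else (L.getD (a - 1) []).getD 1 0) →
    h2 = (if b = 0 then 0 else (R.getD (b - 1) []).getD 1 0) →
    mergeSkylinesLoop (L.drop a) (R.drop b) h1 h2 points =
      points ++ compressPass (prevOf points)
        (decodeLoop L R (movesOf ((L.drop a).map (fun c => c.getD 0 0))
          ((R.drop b).map (fun c => c.getD 0 0))) a b) := by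
  induction n using Nat.strong_induction_on with
  | _ n IH =>
  intro a b h1 h2 points hn ha hb hh1 hh2
  by_cases hal : a < L.length
  · have hLd : L.drop a = L[a] :: L.drop (a + 1) := List.drop_eq_getElem_cons hal
    by_cases hbl : b < R.length
    · have hRd : R.drop b = R[b] :: R.drop (b + 1) := List.drop_eq_getElem_cons hbl
      rw [hLd, hRd]
      by_cases hxy : L[a].getD 0 0 < R[b].getD 0 0
      · -- move 'L'
        rw [show mergeSkylinesLoop (L[a] :: L.drop (a+1)) (R[b] :: R.drop (b+1)) h1 h2 points =
            mergeSkylinesLoop (L.drop (a+1)) (R[b] :: R.drop (b+1)) (L[a].getD 1 0) h2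
              (if points = [] ∨ ((points.getLast?.getD []).getD 1 0) ≠ max (L[a].getD 1 0) h2
                then points ++ [[L[a].getD 0 0, max (L[a].getD 1 0) h2]] else points) by
          simp only [mergeSkylinesLoop, if_pos hxy]]
        simp only [List.map_cons, movesOf, if_pos hxy]
        rw [show decodeLoop L R ('L' :: movesOf ((L.drop (a+1)).map (fun c => c.getD 0 0))
              (R[b].getD 0 0 :: (R.drop (b+1)).map (fun c => c.getD 0 0))) a b =
            (L[a].getD 0 0, max (L[a].getD 1 0) h2) ::
              decodeLoop L R (movesOf ((L.drop (a+1)).map (fun c => c.getD 0 0))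
                (R[b].getD 0 0 :: (R.drop (b+1)).map (fun c => c.getD 0 0))) (a + 1) b by
          simp only [decodeLoop, hh2]
          rw [pymax_eq]
          simp [List.getD, hal]]
        rw [← step_eq]
        have hIH := IH ((L.length - (a+1)) + (R.length - b)) (by omega) (a+1) b (L[a].getD 1 0) h2
            (if points = [] ∨ ((points.getLast?.getD []).getD 1 0) ≠ max (L[a].getD 1 0) h2
              then points ++ [[L[a].getD 0 0, max (L[a].getD 1 0) h2]] else points) rfl
          (by omega) hb (by simp [List.getD, hal]) hh2
        rw [hRd, List.map_cons, prevOf_update] at hIH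
        exact hIH
      · by_cases hyx : R[b].getD 0 0 < L[a].getD 0 0
        · -- move 'R'
          rw [show mergeSkylinesLoop (L[a] :: L.drop (a+1)) (R[b] :: R.drop (b+1)) h1 h2 points =
              mergeSkylinesLoop (L[a] :: L.drop (a+1)) (R.drop (b+1)) h1 (R[b].getD 1 0)
                (if points = [] ∨ ((points.getLast?.getD []).getD 1 0) ≠ max h1 (R[b].getD 1 0)
                  then points ++ [[R[b].getD 0 0, max h1 (R[b].getD 1 0)]] else points) by
            simp only [mergeSkylinesLoop, if_neg hxy, if_pos hyx]]
          simp only [List.map_cons, movesOf, if_neg hxy, if_pos hyx]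
          rw [show decodeLoop L R ('R' :: movesOf (L[a].getD 0 0 :: (L.drop (a+1)).map (fun c => c.getD 0 0))
                ((R.drop (b+1)).map (fun c => c.getD 0 0))) a b =
              (R[b].getD 0 0, max h1 (R[b].getD 1 0)) ::
                decodeLoop L R (movesOf (L[a].getD 0 0 :: (L.drop (a+1)).map (fun c => c.getD 0 0))
                  ((R.drop (b+1)).map (fun c => c.getD 0 0))) a (b + 1) by
            simp only [decodeLoop, hh1]
            rw [pymax_eq]
            simp [List.getD, hbl, max_comm]]
          rw [← step_eq]
          have hIH := IH ((L.length - a) + (R.length - (b+1))) (by omega) a (b+1) h1 (R[b].getD 1 0)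
            (if points = [] ∨ ((points.getLast?.getD []).getD 1 0) ≠ max h1 (R[b].getD 1 0)
              then points ++ [[R[b].getD 0 0, max h1 (R[b].getD 1 0)]] else points) rfl
            ha (by omega) hh1 (by simp [List.getD, hbl])
          rw [hLd, List.map_cons] at hIH
          rw [prevOf_update] at hIH
          exact hIH
        · -- move 'B'
          rw [show mergeSkylinesLoop (L[a] :: L.drop (a+1)) (R[b] :: R.drop (b+1)) h1 h2 points =
              mergeSkylinesLoop (L.drop (a+1)) (R.drop (b+1)) (L[a].getD 1 0) (R[b].getD 1 0)
                (if points = [] ∨ ((points.getLast?.getD []).getD 1 0) ≠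
                    max (L[a].getD 1 0) (R[b].getD 1 0)
                  then points ++ [[L[a].getD 0 0, max (L[a].getD 1 0) (R[b].getD 1 0)]]
                  else points) by
            simp only [mergeSkylinesLoop, if_neg hxy, if_neg hyx]]
          simp only [List.map_cons, movesOf, if_neg hxy, if_neg hyx]
          rw [show decodeLoop L R ('B' :: movesOf ((L.drop (a+1)).map (fun c => c.getD 0 0))
                ((R.drop (b+1)).map (fun c => c.getD 0 0))) a b =
              (L[a].getD 0 0, max (L[a].getD 1 0) (R[b].getD 1 0)) ::
                decodeLoop L R (movesOf ((L.drop (a+1)).map (fun c => c.getD 0 0))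
                  ((R.drop (b+1)).map (fun c => c.getD 0 0))) (a + 1) (b + 1) by
            simp only [decodeLoop]
            rw [pymax_eq]
            simp [List.getD, hal, hbl]]
          rw [← step_eq]
          have hIH := IH ((L.length - (a+1)) + (R.length - (b+1))) (by omega) (a+1) (b+1) (L[a].getD 1 0) (R[b].getD 1 0)
            (if points = [] ∨ ((points.getLast?.getD []).getD 1 0) ≠ max (L[a].getD 1 0) (R[b].getD 1 0)
              then points ++ [[L[a].getD 0 0, max (L[a].getD 1 0) (R[b].getD 1 0)]] else points) rfl
            (by omega) (by omega) (by simp [List.getD, hal]) (by simp [List.getD, hbl])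
          rw [prevOf_update] at hIH
          exact hIH
    · -- right exhausted: tail of 'L' moves
      have hbe : b = R.length := by omega
      have hRd : R.drop b = [] := by simp [hbe]
      rw [hRd, hLd]
      rw [show mergeSkylinesLoop (L[a] :: L.drop (a+1)) [] h1 h2 points =
          mergeSkylinesLoop (L.drop (a+1)) [] (L[a].getD 1 0) h2
            (if points = [] ∨ ((points.getLast?.getD []).getD 1 0) ≠ max (L[a].getD 1 0) h2
              then points ++ [[L[a].getD 0 0, max (L[a].getD 1 0) h2]] else points) by
        simp only [mergeSkylinesLoop]]
      simp only [List.map_cons, List.map_nil, movesOf, List.length_map, List.replicate_succ]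
      rw [show decodeLoop L R ('L' :: List.replicate (L.drop (a+1)).length 'L') a b =
          (L[a].getD 0 0, max (L[a].getD 1 0) h2) ::
            decodeLoop L R (List.replicate (L.drop (a+1)).length 'L') (a + 1) b by
        simp only [decodeLoop, hh2]
        rw [pymax_eq]
        simp [List.getD, hal]]
      rw [← step_eq]
      have hIH := IH ((L.length - (a+1)) + (R.length - b)) (by omega) (a+1) b (L[a].getD 1 0) h2
            (if points = [] ∨ ((points.getLast?.getD []).getD 1 0) ≠ max (L[a].getD 1 0) h2
              then points ++ [[L[a].getD 0 0, max (L[a].getD 1 0) h2]] else points) rfl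
        (by omega) hb (by simp [List.getD, hal]) hh2
      rw [hRd, prevOf_update] at hIH
      simpa [movesOf_nil_right] using hIH
  · -- left exhausted: tail of 'R' moves
    have hae : a = L.length := by omega
    have hLd : L.drop a = [] := by simp [hae]
    rw [hLd]
    by_cases hbl : b < R.length
    · have hRd : R.drop b = R[b] :: R.drop (b + 1) := List.drop_eq_getElem_cons hbl
      rw [hRd]
      rw [show mergeSkylinesLoop [] (R[b] :: R.drop (b+1)) h1 h2 points =
          mergeSkylinesLoop [] (R.drop (b+1)) h1 (R[b].getD 1 0)
            (if points = [] ∨ ((points.getLast?.getD []).getD 1 0) ≠ max h1 (R[b].getD 1 0)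
              then points ++ [[R[b].getD 0 0, max h1 (R[b].getD 1 0)]] else points) by
        simp only [mergeSkylinesLoop]]
      simp only [List.map_cons, List.map_nil, movesOf, List.length_map, List.length_cons,
        List.replicate_succ]
      rw [show decodeLoop L R ('R' :: List.replicate (R.drop (b+1)).length 'R') a b =
          (R[b].getD 0 0, max h1 (R[b].getD 1 0)) ::
            decodeLoop L R (List.replicate (R.drop (b+1)).length 'R') a (b + 1) by
        simp only [decodeLoop, hh1]
        rw [pymax_eq]
        simp [List.getD, hbl, max_comm]]
      rw [← step_eq]
      have hIH := IH ((L.length - a) + (R.length - (b+1))) (by omega) a (b+1) h1 (R[b].getD 1 0)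
            (if points = [] ∨ ((points.getLast?.getD []).getD 1 0) ≠ max h1 (R[b].getD 1 0)
              then points ++ [[R[b].getD 0 0, max h1 (R[b].getD 1 0)]] else points) rfl
        ha (by omega) hh1 (by simp [List.getD, hbl])
      rw [hLd, prevOf_update] at hIH
      simpa [movesOf] using hIH
    · have hbe : b = R.length := by omega
      have hRd : R.drop b = [] := by simp [hbe]
      rw [hRd]
      simp [mergeSkylinesLoop, movesOf, decodeLoop, compressPass]

-- ===== VERDICT (by name: the statement is the Claim_ definition above) =====
theorem mergeSkylines_spec : Claim_equal_mergeSkylines := by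
  intro left right _ _
  unfold Spec_mergeSkylines mergeSkylines mergeSkylines_alt
  have := loop_eq_decode left right (left.length + right.length) 0 0 0 0 []
    (by omega) (by omega) (by omega) (by simp) (by simp)
  simpa [prevOf] using this
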